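-- pv_equiv track=rewrite | github.com/whjjb/KG-XNN | kg/attr_loader.py | _ancestors_bfs
-- ===== SOURCE A (Python) =====
-- from collections import defaultdict, deque
--
-- def _ancestors_bfs(node_id: int, parents, max_depth: int = 3):
--     """
--     从 node_id 出发，沿 is_a 关系向上做 BFS，返回“祖先节点集合”（不含自己）
--     parents: dict[node_id] -> list[parent_id]
--     """
--     vis, q = set(), deque([(node_id, 0)])
--     while q:
--         u, dep = q.popleft()
--         for p in parents.get(u, []):
--             if p not in vis:
--                 vis.add(p)
--                 if dep + 1 < max_depth:
--                     q.append((p, dep + 1))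
--     return vis
-- ===== SOURCE B (Python) =====
-- def _ancestors_bfs(node_id: int, parents, max_depth: int = 3):
--     """Level-synchronous BFS: expand whole frontiers instead of a (node, depth) deque."""
--     vis = set()
--     frontier = [node_id]
--     for _ in range(max(1, max_depth)):
--         if not frontier:
--             break
--         nxt = []
--         for u in frontier:
--             for p in parents.get(u, []):
--                 if p not in vis:
--                     vis.add(p)
--                     nxt.append(p)
--         frontier = nxt
--     return vis
-- ===== Notes on version B (the rewrite author's own statement) =====
-- stated objective: simpler
-- what changed: Replaces the deque of (node, depth) pairs with level-synchronous BFS: a plain frontier list expanded max(1, max_depth) times, so no per-node depth bookkeeping is needed.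
import Mathlib
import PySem

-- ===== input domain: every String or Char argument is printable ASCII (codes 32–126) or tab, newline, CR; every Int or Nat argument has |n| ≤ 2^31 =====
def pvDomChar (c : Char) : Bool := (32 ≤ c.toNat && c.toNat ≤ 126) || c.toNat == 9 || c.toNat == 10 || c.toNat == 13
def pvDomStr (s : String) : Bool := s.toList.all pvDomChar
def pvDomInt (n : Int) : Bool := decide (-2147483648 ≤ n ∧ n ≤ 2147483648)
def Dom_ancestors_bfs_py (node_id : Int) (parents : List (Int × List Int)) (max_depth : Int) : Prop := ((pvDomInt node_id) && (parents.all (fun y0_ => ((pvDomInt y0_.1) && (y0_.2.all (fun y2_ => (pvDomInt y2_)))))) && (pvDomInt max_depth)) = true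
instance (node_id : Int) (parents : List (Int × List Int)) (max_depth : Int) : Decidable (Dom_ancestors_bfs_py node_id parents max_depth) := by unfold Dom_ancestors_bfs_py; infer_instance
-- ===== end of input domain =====

-- B replaces A's deque of (node, depth) pairs by level-synchronous BFS over plain frontier lists (simpler: no per-node depth bookkeeping).


-- ===== PORT A =====
-- exact number of queue pops A's while loop performs, counted level by level; a
-- TOTALITY GUARD only: bfsA below matches its Python step for step and this fuel
-- is proved (ancestors_bfs_py_spec) to let the loop run until the queue empties.
def levelPops (parents : List (Int × List Int)) : Nat → PySem.Set Int → List Int → List Int → Nat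
  | 0, _, _, [] => 0
  | n+1, vis, nxt, [] => levelPops parents n vis [] nxt
  | n, vis, nxt, u :: cur =>
      let st := ((PySem.Dict.mk parents).getD u []).foldl
        (fun (st : PySem.Set Int × List Int) p =>
          if st.1.contains p then st else (st.1.add p, st.2 ++ [p])) (vis, nxt)
      levelPops parents n st.1 st.2 cur + 1
termination_by n _ _ cur => (n, cur.length)

-- the 'while q:' loop of A: pop (u, dep), fold the inner 'for p …' over the queue state
def bfsA (parents : List (Int × List Int)) (max_depth : Int) :
    Nat → PySem.Set Int → List (Int × Int) → PySem.Set Int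
  | _, vis, [] => vis
  | 0, vis, _ :: _ => vis    -- fuel exhausted (never reached with the fuel supplied below)
  | fuel+1, vis, (u, dep) :: q =>
      let st := ((PySem.Dict.mk parents).getD u []).foldl
        (fun (st : PySem.Set Int × List (Int × Int)) p =>
          if st.1.contains p then st
          else (st.1.add p, if dep + 1 < max_depth then st.2 ++ [(p, dep + 1)] else st.2))
        (vis, q)
      bfsA parents max_depth fuel st.1 st.2

def ancestors_bfs_py (node_id : Int) (parents : List (Int × List Int)) (max_depth : Int) : List Int :=
  bfsA parents max_depth
    (levelPops parents (max_depth - 1).toNat PySem.Set.empty [] [node_id])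
    PySem.Set.empty [(node_id, 0)]

-- ===== PORT B =====
-- inner 'for p in parents.get(u, []):' body of B
def bfsInner (st : PySem.Set Int × List Int) (p : Int) : PySem.Set Int × List Int :=
  if st.1.contains p then st else (st.1.add p, st.2 ++ [p])

-- 'for _ in range(max(1, max_depth)):' — expand the whole frontier, then recurse on nxt
def altLoop (parents : List (Int × List Int)) : Nat → PySem.Set Int → List Int → PySem.Set Int
  | 0, vis, _ => vis
  | n+1, vis, frontier =>
      if frontier.isEmpty then vis    -- 'if not frontier: break'
      else
        let st := frontier.foldl (fun st u => ((PySem.Dict.mk parents).getD u []).foldl bfsInner st)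
          (vis, ([] : List Int))
        altLoop parents n st.1 st.2

def ancestors_bfs_py_alt (node_id : Int) (parents : List (Int × List Int)) (max_depth : Int) : List Int :=
  altLoop parents (max 1 max_depth).toNat PySem.Set.empty [node_id]

-- ===== PRECONDITION & SPEC =====
def Spec_ancestors_bfs_py (node_id : Int) (parents : List (Int × List Int)) (max_depth : Int) (out : List Int) : Prop := out = ancestors_bfs_py_alt node_id parents max_depth
instance (node_id : Int) (parents : List (Int × List Int)) (max_depth : Int) (out : List Int) : Decidable (Spec_ancestors_bfs_py node_id parents max_depth out) := by unfold Spec_ancestors_bfs_py; infer_instance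

-- ===== CLAIM (what is proved, stated in full; the proofs are below) =====
def Claim_equal_ancestors_bfs_py : Prop := ∀ (node_id : Int) (parents : List (Int × List Int)) (max_depth : Int), Dom_ancestors_bfs_py node_id parents max_depth → Spec_ancestors_bfs_py node_id parents max_depth (ancestors_bfs_py node_id parents max_depth)

-- ===== LEMMAS AND PROOFS =====

-- A's fuel helper spells B's inner step out as a lambda; they are definitionally equal
theorem inner_def : (fun (st : PySem.Set Int × List Int) p =>
    if st.1.contains p then st else (st.1.add p, st.2 ++ [p])) = bfsInner := rfl

-- the vis component of the inner fold ignores the list accumulator; the list grows by a suffix independent of it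
theorem bfsInner_acc (ps : List Int) (vis : PySem.Set Int) (a : List Int) :
    ps.foldl bfsInner (vis, a) =
      ((ps.foldl bfsInner (vis, [])).1, a ++ (ps.foldl bfsInner (vis, [])).2) := by
  induction ps generalizing vis a with
  | nil => simp
  | cons p ps ih =>
    simp only [List.foldl_cons, bfsInner]
    by_cases h : vis.contains p = true
    · simp only [h, if_true]; exact ih vis a
    · simp only [h, Bool.false_eq_true, if_false]
      rw [ih (vis.add p) (a ++ [p]), ih (vis.add p) ([] ++ [p])]
      simp

-- A's inner fold = B's inner fold from [], with the appends mapped to depth d+1 (or dropped when dep+1 ≥ max_depth)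
theorem bfsInnerA_eq (md : Int) (d : Int) (ps : List Int) (vis : PySem.Set Int) (q0 : List (Int × Int)) :
    ps.foldl
      (fun (st : PySem.Set Int × List (Int × Int)) p =>
        if st.1.contains p then st
        else (st.1.add p, if d + 1 < md then st.2 ++ [(p, d + 1)] else st.2))
      (vis, q0) =
    ((ps.foldl bfsInner (vis, [])).1,
      q0 ++ if d + 1 < md then (ps.foldl bfsInner (vis, [])).2.map (fun p => (p, d + 1)) else []) := by
  induction ps generalizing vis q0 with
  | nil => simp
  | cons p ps ih =>
    simp only [List.foldl_cons, bfsInner]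
    by_cases h : vis.contains p = true
    · simp only [h, if_true]; exact ih vis q0
    · simp only [h, Bool.false_eq_true, if_false]
      rw [ih (vis.add p), bfsInner_acc ps (vis.add p) ([] ++ [p])]
      by_cases hc : d + 1 < md <;> simp [hc]

-- level-structured view of B's computation, threading the partial next frontier
def levelRun (parents : List (Int × List Int)) : Nat → PySem.Set Int → List Int → List Int → PySem.Set Int
  | 0, vis, _, [] => vis
  | n+1, vis, nxt, [] => levelRun parents n vis [] nxt
  | n, vis, nxt, u :: cur =>
      let st := ((PySem.Dict.mk parents).getD u []).foldl bfsInner (vis, nxt)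
      levelRun parents n st.1 st.2 cur
termination_by n _ _ cur => (n, cur.length)

-- main simulation: A's queue is always (current level at depth d) ++ (next level at depth d+1)
theorem bfsA_levelRun (parents : List (Int × List Int)) (md : Int) :
    ∀ (n : Nat) (cur nxt : List Int) (vis : PySem.Set Int) (d : Int),
      n = (md - 1 - d).toNat →
      bfsA parents md (levelPops parents n vis nxt cur) vis
        (cur.map (fun u => (u, d)) ++ if n = 0 then [] else nxt.map (fun u => (u, d + 1)))
        = levelRun parents n vis nxt cur := by
  intro n
  induction n with
  | zero =>
    intro cur
    induction cur with
    | nil =>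
      intro nxt vis d _
      simp [levelPops, levelRun, bfsA]
    | cons u cur ih =>
      intro nxt vis d hd
      have hcond : ¬ (d + 1 < md) := by omega
      simp only [levelPops, levelRun, inner_def, List.map_cons, List.cons_append]
      rw [bfsA, bfsInnerA_eq md d]
      simp only [hcond, if_false, List.append_nil]
      have := ih ((((PySem.Dict.mk parents).getD u []).foldl bfsInner (vis, nxt)).2)
        ((((PySem.Dict.mk parents).getD u []).foldl bfsInner (vis, nxt)).1) d hd
      rw [bfsInner_acc ((PySem.Dict.mk parents).getD u []) vis nxt] at this ⊢
      simpa using this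
  | succ n ihn =>
    intro cur
    induction cur with
    | nil =>
      intro nxt vis d hd
      have hd' : n = (md - 1 - (d + 1)).toNat := by omega
      have := ihn nxt [] vis (d + 1) hd'
      simp only [levelPops, levelRun]
      by_cases hn : n = 0 <;> simp [hn] at this ⊢ <;> simpa using this
    | cons u cur ih =>
      intro nxt vis d hd
      have hcond : d + 1 < md := by omega
      simp only [levelPops, levelRun, inner_def, List.map_cons, List.cons_append]
      rw [bfsA, bfsInnerA_eq md d]
      simp only [hcond, if_true, Nat.succ_ne_zero, if_false]
      have := ih ((((PySem.Dict.mk parents).getD u []).foldl bfsInner (vis, nxt)).2)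
        ((((PySem.Dict.mk parents).getD u []).foldl bfsInner (vis, nxt)).1) d hd
      simp only [Nat.succ_ne_zero, if_false] at this
      rw [bfsInner_acc ((PySem.Dict.mk parents).getD u []) vis nxt] at this ⊢
      simpa [List.map_append] using this

-- levelRun consumes its current level as one fold, then recurses
theorem levelRun_fold (parents : List (Int × List Int)) :
    ∀ (cur : List Int) (n : Nat) (vis : PySem.Set Int) (nxt : List Int),
      levelRun parents n vis nxt cur =
        (match n with
          | 0 => ((cur.foldl (fun st u => ((PySem.Dict.mk parents).getD u []).foldl bfsInner st) (vis, nxt)).1)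
          | n'+1 => levelRun parents n'
              ((cur.foldl (fun st u => ((PySem.Dict.mk parents).getD u []).foldl bfsInner st) (vis, nxt)).1)
              []
              ((cur.foldl (fun st u => ((PySem.Dict.mk parents).getD u []).foldl bfsInner st) (vis, nxt)).2)) := by
  intro cur
  induction cur with
  | nil =>
    intro n vis nxt
    cases n <;> simp [levelRun]
  | cons u cur ih =>
    intro n vis nxt
    cases n <;> · rw [levelRun]; simp only [List.foldl_cons]; exact ih _ _ _

theorem altLoop_nil (parents : List (Int × List Int)) :
    ∀ (n : Nat) (vis : PySem.Set Int), altLoop parents n vis [] = vis := by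
  intro n vis
  cases n <;> simp [altLoop]

theorem levelRun_altLoop (parents : List (Int × List Int)) :
    ∀ (n : Nat) (vis : PySem.Set Int) (cur : List Int),
      levelRun parents n vis [] cur = altLoop parents (n + 1) vis cur := by
  intro n
  induction n with
  | zero =>
    intro vis cur
    rw [levelRun_fold]
    cases cur <;> simp [altLoop]
  | succ n ih =>
    intro vis cur
    rw [levelRun_fold]
    cases cur with
    | nil => simp only [List.foldl_nil]; rw [ih]; simp [altLoop, altLoop_nil]
    | cons u cur => simp only [altLoop, List.isEmpty_cons, if_neg Bool.false_ne_true]; exact ih _ _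

-- ===== VERDICT (by name: the statement is the Claim_ definition above) =====
theorem ancestors_bfs_py_spec : Claim_equal_ancestors_bfs_py := by
  intro node_id parents max_depth _
  unfold Spec_ancestors_bfs_py ancestors_bfs_py ancestors_bfs_py_alt
  have h := bfsA_levelRun parents max_depth ((max_depth - 1).toNat) [node_id] []
    PySem.Set.empty 0 (by omega)
  have hq : ([node_id].map (fun u => (u, (0:Int))) ++
      if (max_depth - 1).toNat = 0 then [] else ([] : List Int).map (fun u => (u, (0:Int) + 1)))
      = [(node_id, (0:Int))] := by
    by_cases h0 : (max_depth - 1).toNat = 0 <;> simp [h0]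
  rw [hq] at h
  rw [h, levelRun_altLoop]
  have : (max_depth - 1).toNat + 1 = (max 1 max_depth).toNat := by omega
  rw [this]
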